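-- pv_equiv track=rewrite | github.com/cbib/TrialMatchAI | src/Preprocessor/preprocessing_utils.py | split_lines_on_semicolon
-- ===== SOURCE A (Python) =====
-- def replace_parentheses_with_braces(text):
--     """
--     Replace parentheses and brackets with curly braces in the given text.
--
--     Parameters:
--         text (str): The input text.
--
--     Returns:
--         str: The modified text with parentheses and brackets replaced by curly braces.
--     """
--     stack = []
--     result = ""
--     for char in text:
--         if char in '([':
--             stack.append(char)
--             result += "{"
--         elif char in ')]':
--             if stack:
--                 stack.pop()
--                 result += "}"
--             else:
--                 result += char
--         else:
--             result += char
--     return result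
--
-- def split_lines_on_semicolon(lines):
--     """
--     Splits lines on semicolons not within braces.
--
--     Parameters:
--         lines (list): A list of lines.
--
--     Returns:
--         list: A list of split lines.
--     """
--     split_lines = []
--     for line in lines:
--         line = replace_parentheses_with_braces(line)
--         parts = []
--         temp = ""
--         inside_braces = False
--         for char in line:
--             if char == '{':
--                 inside_braces = True
--             elif char == '}':
--                 inside_braces = False
--             elif char == ';' and not inside_braces:
--                 parts.append(temp.strip())
--                 temp = ""
--                 continue
--             temp += char
--         parts.append(temp.strip())
--         split_lines.extend(parts)
--     return split_lines
-- ===== SOURCE B (Python) =====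
-- def split_lines_on_semicolon(lines):
--     """Single fused scan per line: depth counter + inside flag, no intermediate string (same result as the two-pass version)."""
--     out = []
--     for line in lines:
--         depth = 0
--         inside = False
--         seg = []
--         for ch in line:
--             if ch in '([':
--                 depth += 1
--                 inside = True
--                 seg.append('{')
--             elif ch in ')]':
--                 if depth:
--                     depth -= 1
--                     inside = False
--                     seg.append('}')
--                 else:
--                     seg.append(ch)
--             elif ch == '{':
--                 inside = True
--                 seg.append(ch)
--             elif ch == '}':
--                 inside = False
--                 seg.append(ch)
--             elif ch == ';' and not inside:
--                 out.append(''.join(seg).strip())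
--                 seg = []
--             else:
--                 seg.append(ch)
--         out.append(''.join(seg).strip())
--     return out
-- ===== Notes on version B (the rewrite author's own statement) =====
-- stated objective: alternative
-- what changed: Fuses A's two passes (bracket-to-brace rewriting via a stack, then semicolon splitting of the intermediate string) into one scan per line that keeps a depth counter and the inside flag and emits stripped segments directly, never building the intermediate transformed string or the per-line parts list.
import Mathlib
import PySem

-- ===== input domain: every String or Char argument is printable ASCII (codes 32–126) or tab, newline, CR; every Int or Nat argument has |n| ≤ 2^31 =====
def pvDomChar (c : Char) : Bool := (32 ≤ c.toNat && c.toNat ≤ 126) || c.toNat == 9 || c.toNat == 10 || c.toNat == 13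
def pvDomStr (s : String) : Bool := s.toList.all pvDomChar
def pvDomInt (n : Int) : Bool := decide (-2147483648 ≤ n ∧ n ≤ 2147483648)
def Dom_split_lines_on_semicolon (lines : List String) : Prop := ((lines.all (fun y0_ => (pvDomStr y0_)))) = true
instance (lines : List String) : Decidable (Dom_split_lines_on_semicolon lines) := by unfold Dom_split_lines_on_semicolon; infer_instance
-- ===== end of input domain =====

-- B fuses A's two passes into one scan per line (depth counter + inside flag), skipping the
-- intermediate brace-rewritten string; objective: alternative single-pass decomposition, same O(n).

-- ===== PORT A =====
-- pass 1 loop body, state: (stack, result)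
def rpwbStep (st : List Char × List Char) (c : Char) : List Char × List Char :=
  if c = '(' ∨ c = '[' then (c :: st.1, st.2 ++ ['{'])
  else if c = ')' ∨ c = ']' then
    match st.1 with
    | [] => (st.1, st.2 ++ [c])
    | _ :: rest => (rest, st.2 ++ ['}'])
  else (st.1, st.2 ++ [c])

def replace_parentheses_with_braces (text : String) : String :=
  String.ofList (text.toList.foldl rpwbStep ([], [])).2

-- pass 2 loop body, state: (parts, temp, inside_braces)
def splitStepA (st : List String × List Char × Bool) (c : Char) : List String × List Char × Bool :=
  if c = '{' then (st.1, st.2.1 ++ [c], true)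
  else if c = '}' then (st.1, st.2.1 ++ [c], false)
  else if c = ';' ∧ st.2.2 = false then (st.1 ++ [PySem.Str.strip (String.ofList st.2.1)], [], st.2.2)
  else (st.1, st.2.1 ++ [c], st.2.2)

-- A's per-line body: rewrite the line, then split it on top-level semicolons
def lineA (line : String) : List String :=
  let st := (replace_parentheses_with_braces line).toList.foldl splitStepA ([], [], false)
  st.1 ++ [PySem.Str.strip (String.ofList st.2.1)]

def split_lines_on_semicolon (lines : List String) : List String :=
  lines.foldl (fun acc line => acc ++ lineA line) []

-- ===== PORT B =====
-- fused loop body, state: (parts, seg, depth, inside)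
def fusedStep (st : List String × List Char × Nat × Bool) (c : Char) : List String × List Char × Nat × Bool :=
  if c = '(' ∨ c = '[' then (st.1, st.2.1 ++ ['{'], st.2.2.1 + 1, true)
  else if c = ')' ∨ c = ']' then
    if st.2.2.1 ≠ 0 then (st.1, st.2.1 ++ ['}'], st.2.2.1 - 1, false)
    else (st.1, st.2.1 ++ [c], st.2.2.1, st.2.2.2)
  else if c = '{' then (st.1, st.2.1 ++ [c], st.2.2.1, true)
  else if c = '}' then (st.1, st.2.1 ++ [c], st.2.2.1, false)
  else if c = ';' ∧ st.2.2.2 = false then (st.1 ++ [PySem.Str.strip (String.ofList st.2.1)], [], st.2.2.1, st.2.2.2)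
  else (st.1, st.2.1 ++ [c], st.2.2.1, st.2.2.2)

-- B's per-line body: one scan
def lineB (line : String) : List String :=
  let st := line.toList.foldl fusedStep ([], [], 0, false)
  st.1 ++ [PySem.Str.strip (String.ofList st.2.1)]

def split_lines_on_semicolon_alt (lines : List String) : List String :=
  lines.foldl (fun acc line => acc ++ lineB line) []

-- ===== PRECONDITION & SPEC =====
def Spec_split_lines_on_semicolon (lines : List String) (out : List String) : Prop := out = split_lines_on_semicolon_alt lines
instance (lines : List String) (out : List String) : Decidable (Spec_split_lines_on_semicolon lines out) := by unfold Spec_split_lines_on_semicolon; infer_instance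

-- ===== CLAIM (what is proved, stated in full; the proofs are below) =====
def Claim_equal_split_lines_on_semicolon : Prop := ∀ (lines : List String), Dom_split_lines_on_semicolon lines → Spec_split_lines_on_semicolon lines (split_lines_on_semicolon lines)

-- ===== LEMMAS AND PROOFS =====

-- pass 1 accumulator decomposition
theorem rpwb_acc (cs : List Char) : ∀ (st r : List Char),
    List.foldl rpwbStep (st, r) cs
      = ((List.foldl rpwbStep (st, []) cs).1, r ++ (List.foldl rpwbStep (st, []) cs).2) := by
  induction cs with
  | nil => intro st r; simp
  | cons c cs ih =>
    intro st r
    have hstep : ∀ (s r' : List Char), rpwbStep (s, r') c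
        = ((rpwbStep (s, []) c).1, r' ++ (rpwbStep (s, []) c).2) := by
      intro s r'
      unfold rpwbStep
      split_ifs <;> cases s <;> simp
    rcases hx : rpwbStep (st, []) c with ⟨s', e⟩
    simp only [List.foldl_cons]
    rw [hstep st r, hx]
    rw [ih s' (r ++ e), ih s' e]
    simp

-- the fused scan equals pass 2 run on pass 1's output
theorem fused_eq (cs : List Char) : ∀ (st : List Char) (p : List String) (t : List Char) (b : Bool),
    List.foldl splitStepA (p, t, b) ((List.foldl rpwbStep (st, []) cs).2)
      = ((List.foldl fusedStep (p, t, st.length, b) cs).1,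
         (List.foldl fusedStep (p, t, st.length, b) cs).2.1,
         (List.foldl fusedStep (p, t, st.length, b) cs).2.2.2) := by
  induction cs with
  | nil => intro st p t b; simp
  | cons c cs ih =>
    intro st p t b
    simp only [List.foldl_cons]
    by_cases h1 : c = '(' ∨ c = '['
    · have hA : rpwbStep (st, []) c = (c :: st, ['{']) := by
        unfold rpwbStep; simp [h1]
      have hB : fusedStep (p, t, st.length, b) c = (p, t ++ ['{'], st.length + 1, true) := by
        unfold fusedStep; simp [h1]
      have hS : splitStepA (p, t, b) '{' = (p, t ++ ['{'], true) := by
        simp [splitStepA]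
      rw [hA, rpwb_acc cs (c :: st) ['{'], hB]
      simpa [hS] using ih (c :: st) p (t ++ ['{']) true
    · by_cases h2 : c = ')' ∨ c = ']'
      · have hc : c ≠ '{' ∧ c ≠ '}' ∧ c ≠ ';' := by
          rcases h2 with h | h <;> subst h <;> exact ⟨by decide, by decide, by decide⟩
        cases st with
        | nil =>
          have hA : rpwbStep (([] : List Char), []) c = ([], [c]) := by
            unfold rpwbStep; simp [h1, h2]
          have hB : fusedStep (p, t, (0 : Nat), b) c = (p, t ++ [c], 0, b) := by
            unfold fusedStep; simp [h1, h2]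
          have hS : splitStepA (p, t, b) c = (p, t ++ [c], b) := by
            simp [splitStepA, hc.1, hc.2.1, hc.2.2]
          rw [List.length_nil, hA, rpwb_acc cs [] [c], hB]
          simpa [hS] using ih [] p (t ++ [c]) b
        | cons x xs =>
          have hA : rpwbStep (x :: xs, []) c = (xs, ['}']) := by
            unfold rpwbStep; simp [h1, h2]
          have hB : fusedStep (p, t, (x :: xs).length, b) c
              = (p, t ++ ['}'], xs.length, false) := by
            unfold fusedStep; simp [h1, h2]
          have hS : splitStepA (p, t, b) '}' = (p, t ++ ['}'], false) := by
            have : ('}' : Char) ≠ '{' := by decide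
            simp [splitStepA, this]
          rw [hA, rpwb_acc cs xs ['}'], hB]
          simpa [hS] using ih xs p (t ++ ['}']) false
      · -- c passes through pass 1 unchanged
        have hA : rpwbStep (st, []) c = (st, [c]) := by
          unfold rpwbStep; simp [h1, h2]
        rw [hA, rpwb_acc cs st [c]]
        by_cases hbrO : c = '{'
        · have hB : fusedStep (p, t, st.length, b) c = (p, t ++ [c], st.length, true) := by
            unfold fusedStep; simp [hbrO]
          have hS : splitStepA (p, t, b) c = (p, t ++ [c], true) := by
            simp [splitStepA, hbrO]
          rw [hB]
          simpa [hS] using ih st p (t ++ [c]) true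
        · by_cases hbrC : c = '}'
          · have hB : fusedStep (p, t, st.length, b) c = (p, t ++ [c], st.length, false) := by
              unfold fusedStep; simp [hbrC]
            have hS : splitStepA (p, t, b) c = (p, t ++ [c], false) := by
              simp [splitStepA, hbrC]
            rw [hB]
            simpa [hS] using ih st p (t ++ [c]) false
          · by_cases hsem : c = ';' ∧ b = false
            · have hB : fusedStep (p, t, st.length, b) c
                  = (p ++ [PySem.Str.strip (String.ofList t)], [], st.length, b) := by
                unfold fusedStep
                rw [if_neg h1, if_neg h2, if_neg hbrO, if_neg hbrC, if_pos hsem]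
              have hS : splitStepA (p, t, b) c
                  = (p ++ [PySem.Str.strip (String.ofList t)], [], b) := by
                unfold splitStepA
                rw [if_neg hbrO, if_neg hbrC, if_pos hsem]
              rw [hB]
              simpa [hS] using ih st (p ++ [PySem.Str.strip (String.ofList t)]) [] b
            · have hB : fusedStep (p, t, st.length, b) c = (p, t ++ [c], st.length, b) := by
                unfold fusedStep
                rw [if_neg h1, if_neg h2, if_neg hbrO, if_neg hbrC, if_neg hsem]
              have hS : splitStepA (p, t, b) c = (p, t ++ [c], b) := by
                unfold splitStepA
                rw [if_neg hbrO, if_neg hbrC, if_neg hsem]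
              rw [hB]
              simpa [hS] using ih st p (t ++ [c]) b

-- per-line agreement
theorem line_eq (line : String) : lineA line = lineB line := by
  unfold lineA lineB replace_parentheses_with_braces
  have h := fused_eq line.toList [] [] [] false
  simp only [List.length_nil] at h
  simp only [String.toList_ofList]
  rw [h]

-- ===== VERDICT (by name: the statement is the Claim_ definition above) =====
theorem split_lines_on_semicolon_spec : Claim_equal_split_lines_on_semicolon := by
  intro lines hd
  clear hd
  show split_lines_on_semicolon lines = split_lines_on_semicolon_alt lines
  unfold split_lines_on_semicolon split_lines_on_semicolon_alt
  suffices h : ∀ acc : List String,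
      List.foldl (fun acc line => acc ++ lineA line) acc lines
        = List.foldl (fun acc line => acc ++ lineB line) acc lines from h []
  induction lines with
  | nil => intro acc; rfl
  | cons x xs ih =>
    intro acc
    simp only [List.foldl_cons, line_eq x]
    exact ih (acc ++ lineB x)
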